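-- pv_equiv track=rewrite | github.com/whiskyboy/CVAE_GNMT | nmt/serving/inference_service.py | _refineAndValidateComment
-- ===== SOURCE A (Python) =====
-- from itertools import groupby
--
-- def _refineAndValidateComment(comment):
--     tokens = comment.split()
--     if "<unk>" in tokens:
--         return None
--     refined_tokens = [k for k, g in groupby(tokens)]  # remove consecutive duplicated tokens
--     if len(refined_tokens) != len(set(refined_tokens)):  # still has non-consecutive duplicated tokens
--         return None
--     return " ".join(refined_tokens)
-- ===== SOURCE B (Python) =====
-- def _refineAndValidateComment(comment):
--     prev = None
--     seen = set()
--     out = []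
--     for t in comment.split():
--         if t == prev:
--             continue
--         if t == "<unk>" or t in seen:
--             return None
--         out.append(t)
--         seen.add(t)
--         prev = t
--     return " ".join(out)
-- ===== Notes on version B (the rewrite author's own statement) =====
-- stated objective: alternative
-- what changed: Replaces A's three passes (unk membership scan, groupby collapse into an intermediate list, set-size duplicate check, then join) by one fused early-returning traversal keeping prev/seen/out.
import Mathlib
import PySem

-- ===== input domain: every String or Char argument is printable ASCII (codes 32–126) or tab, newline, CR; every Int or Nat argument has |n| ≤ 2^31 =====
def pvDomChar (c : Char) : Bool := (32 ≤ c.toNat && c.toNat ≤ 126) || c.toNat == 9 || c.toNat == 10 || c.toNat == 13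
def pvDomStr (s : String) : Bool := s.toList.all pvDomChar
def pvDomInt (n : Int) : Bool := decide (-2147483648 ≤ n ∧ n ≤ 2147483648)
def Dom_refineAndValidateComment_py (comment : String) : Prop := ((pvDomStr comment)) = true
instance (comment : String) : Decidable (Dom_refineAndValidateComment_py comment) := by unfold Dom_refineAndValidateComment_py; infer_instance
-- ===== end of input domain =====

-- B fuses A's three passes (unk scan, groupby collapse, set-size duplicate check) into one
-- early-returning traversal with prev/seen/out; equivalence of return values is proved.

-- ===== PORT A =====
-- [k for k, g in groupby(tokens)]: the keys of itertools.groupby = tokens with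
-- consecutive duplicates collapsed (hand-ported; exact for this use of groupby)
def groupbyKeys : List String → List String
  | [] => []
  | [x] => [x]
  | x :: y :: r => if x = y then groupbyKeys (y :: r) else x :: groupbyKeys (y :: r)

def refineAndValidateComment_py (comment : String) : Option String :=
  let tokens := PySem.Str.split₀ comment
  if "<unk>" ∈ tokens then none
  else
    let refined := groupbyKeys tokens
    if refined.length ≠ (PySem.Set.ofList refined).length then none
    else some (PySem.Str.join " " refined)

-- ===== PORT B =====
-- the for-loop of Source B: state = (prev, seen, out); 'return None' = none
def altLoop : List String → Option String → PySem.Set String → List String → Option (List String)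
  | [], _, _, out => some out
  | t :: rest, prev, seen, out =>
    if some t = prev then altLoop rest prev seen out
    else if t = "<unk>" ∨ PySem.Set.contains seen t = true then none
    else altLoop rest (some t) (PySem.Set.add seen t) (out ++ [t])

def refineAndValidateComment_py_alt (comment : String) : Option String :=
  match altLoop (PySem.Str.split₀ comment) none PySem.Set.empty [] with
  | none => none
  | some out => some (PySem.Str.join " " out)

-- ===== PRECONDITION & SPEC =====
def Spec_refineAndValidateComment_py (comment : String) (out : Option String) : Prop := out = refineAndValidateComment_py_alt comment
instance (comment : String) (out : Option String) : Decidable (Spec_refineAndValidateComment_py comment out) := by unfold Spec_refineAndValidateComment_py; infer_instance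

-- ===== CLAIM (what is proved, stated in full; the proofs are below) =====
def Claim_equal_refineAndValidateComment_py : Prop := ∀ (comment : String), Dom_refineAndValidateComment_py comment → Spec_refineAndValidateComment_py comment (refineAndValidateComment_py comment)

-- ===== LEMMAS AND PROOFS =====

-- collapse consecutive duplicates, skipping a leading run equal to prev
def collapseP : Option String → List String → List String
  | _, [] => []
  | p, t :: rest => if some t = p then collapseP p rest else t :: collapseP (some t) rest

-- B's loop with the prev-skip already applied
def runL : PySem.Set String → List String → List String → Option (List String)
  | _, out, [] => some out
  | seen, out, t :: rest =>
    if t = "<unk>" ∨ PySem.Set.contains seen t = true then none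
    else runL (PySem.Set.add seen t) (out ++ [t]) rest

theorem groupbyKeys_cons (x : String) (r : List String) :
    groupbyKeys (x :: r) = x :: collapseP (some x) r := by
  induction r generalizing x with
  | nil => simp [groupbyKeys, collapseP]
  | cons y r ih =>
    by_cases h : x = y
    · subst h
      simp [groupbyKeys, collapseP, ih]
    · simp [groupbyKeys, collapseP, h, Ne.symm h, ih]

theorem groupbyKeys_eq (ts : List String) : groupbyKeys ts = collapseP none ts := by
  cases ts with
  | nil => rfl
  | cons x r => simp [groupbyKeys_cons, collapseP]

theorem mem_collapseP (x : String) (ts : List String) (prev : Option String)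
    (h : some x ≠ prev) : x ∈ collapseP prev ts ↔ x ∈ ts := by
  induction ts generalizing prev with
  | nil => simp [collapseP]
  | cons t rest ih =>
    by_cases ht : some t = prev
    · have hx : x ≠ t := by
        intro he; exact h (he ▸ ht)
      simp [collapseP, ht, ih prev h, hx]
    · by_cases hx : x = t
      · subst hx; simp [collapseP, ht]
      · simp [collapseP, ht, hx, ih (some t) (by simpa using hx)]

theorem altLoop_eq_runL (ts : List String) (prev : Option String)
    (seen : PySem.Set String) (out : List String) :
    altLoop ts prev seen out = runL seen out (collapseP prev ts) := by
  induction ts generalizing prev seen out with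
  | nil => rfl
  | cons t rest ih =>
    by_cases hp : some t = prev
    · simp [altLoop, collapseP, hp, ih]
    · simp only [altLoop, collapseP, if_neg hp, runL]
      split
      · rfl
      · exact ih _ _ _

theorem runL_char (c : List String) (seen : PySem.Set String) (out : List String) :
    runL seen out c =
      if c.Nodup ∧ ∀ x ∈ c, x ∉ seen ∧ x ≠ "<unk>" then some (out ++ c) else none := by
  induction c generalizing seen out with
  | nil => simp [runL]
  | cons t rest ih =>
    by_cases hc : t = "<unk>" ∨ PySem.Set.contains seen t = true
    · rw [runL]
      rw [if_pos hc, if_neg]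
      rcases hc with h | h
      · subst h; rintro ⟨-, hall⟩
        exact (hall _ (by simp)).2 rfl
      · rintro ⟨-, hall⟩
        exact (hall t (by simp)).1 ((PySem.Set.contains_iff seen t).mp h)
    · rw [not_or] at hc
      rw [runL, if_neg (not_or.mpr hc), ih]
      have hts : t ∉ seen := fun hm =>
        hc.2 ((PySem.Set.contains_iff seen t).mpr hm)
      by_cases hcond : rest.Nodup ∧ ∀ x ∈ rest, x ∉ PySem.Set.add seen t ∧ x ≠ "<unk>"
      · rw [if_pos hcond, if_pos]
        · simp
        · obtain ⟨hnd, hall⟩ := hcond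
          refine ⟨List.nodup_cons.mpr ⟨fun hm => ((hall t hm).1 (by simp [PySem.Set.mem_add])), hnd⟩, ?_⟩
          intro x hx
          rcases List.mem_cons.mp hx with rfl | hx
          · exact ⟨hts, hc.1⟩
          · exact ⟨fun hm => (hall x hx).1 (by simp [PySem.Set.mem_add, hm]), (hall x hx).2⟩
      · rw [if_neg hcond, if_neg]
        rintro ⟨hnd, hall⟩
        apply hcond
        refine ⟨hnd.of_cons, ?_⟩
        intro x hx
        have hne : x ≠ t := fun he => (List.nodup_cons.mp hnd).1 (he ▸ hx)
        have := hall x (List.mem_cons_of_mem _ hx)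
        exact ⟨fun hm => by
          rcases (PySem.Set.mem_add seen t x).mp hm with hm | hm
          · exact this.1 hm
          · exact hne hm, this.2⟩

theorem length_ofList_lt_of_not_nodup (xs : List String) (h : ¬ xs.Nodup) :
    (PySem.Set.ofList xs).length < xs.length := by
  induction xs with
  | nil => simp at h
  | cons x rest ih =>
    rw [PySem.Set.ofList_cons]
    by_cases hx : x ∈ rest
    · have hmem : x ∈ PySem.Set.ofList rest := (PySem.Set.mem_ofList rest x).mpr hx
      have hlt : ((PySem.Set.ofList rest).filter (fun y => !y == x)).length <
          (PySem.Set.ofList rest).length := by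
        apply List.length_filter_lt_length_iff_exists.mpr
        exact ⟨x, hmem, by simp⟩
      have hle := PySem.Set.length_ofList_le rest
      simp only [PySem.Set.discard, List.length_cons]
      omega
    · have hrest : ¬ rest.Nodup := by
        intro hnd; exact h (List.nodup_cons.mpr ⟨hx, hnd⟩)
      have hlt := ih hrest
      have hle : ((PySem.Set.ofList rest).filter (fun y => !y == x)).length ≤
          (PySem.Set.ofList rest).length := List.length_filter_le _ _
      simp only [PySem.Set.discard, List.length_cons]
      omega

-- ===== VERDICT (by name: the statement is the Claim_ definition above) =====
theorem refineAndValidateComment_py_spec : Claim_equal_refineAndValidateComment_py := by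
  intro comment _
  unfold Spec_refineAndValidateComment_py refineAndValidateComment_py refineAndValidateComment_py_alt
  simp only [altLoop_eq_runL, runL_char, groupbyKeys_eq, List.nil_append]
  set ts := PySem.Str.split₀ comment with hts
  set c := collapseP none ts with hc
  have hmem : "<unk>" ∈ c ↔ "<unk>" ∈ ts := mem_collapseP _ ts none (by simp)
  by_cases hu : "<unk>" ∈ ts
  · have hB : ¬(c.Nodup ∧ ∀ x ∈ c, x ∉ PySem.Set.empty ∧ x ≠ "<unk>") := by
      rintro ⟨-, hall⟩
      exact (hall _ (hmem.mpr hu)).2 rfl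
    rw [if_pos hu, if_neg hB]
  · by_cases hnd : c.Nodup
    · have hB : c.Nodup ∧ ∀ x ∈ c, x ∉ PySem.Set.empty ∧ x ≠ "<unk>" :=
        ⟨hnd, fun x hx => ⟨by simp [PySem.Set.empty], fun he => hu (hmem.mp (he ▸ hx))⟩⟩
    -- A's length test passes
      have heq : PySem.Set.ofList c = c := PySem.Set.ofList_eq_self_of_nodup c hnd
      have hlen : ¬ c.length ≠ (PySem.Set.ofList c).length := by rw [heq]; simp
      rw [if_neg hu, if_neg hlen, if_pos hB]
    · have hB : ¬(c.Nodup ∧ ∀ x ∈ c, x ∉ PySem.Set.empty ∧ x ≠ "<unk>") := fun h => hnd h.1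
      have hlt := length_ofList_lt_of_not_nodup c hnd
      have hlen : c.length ≠ (PySem.Set.ofList c).length := by omega
      rw [if_neg hu, if_pos hlen, if_neg hB]
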